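-- pv_equiv track=rewrite | github.com/Redoxfox/ligas | Ligas/lib/Bbinaria.py | binaria
-- ===== SOURCE A (Python) =====
-- def binaria(vector, numero):
--     puntero = 0
--     vectorLen = len(vector) - 1
--     encontrado = False
--     while not (encontrado) and puntero <= vectorLen:
--         mitad = int((puntero + vectorLen) / 2)
--         if numero == vector[mitad][1]:
--             encontrado = True
--         elif numero < vector[mitad][1]:
--             vectorLen = mitad - 1
--         else:
--             puntero = mitad + 1
--     if (encontrado):
--         return mitad
--     else:
--         return None
-- ===== SOURCE B (Python) =====
-- def binaria(vector, numero):
--     def go(lo, hi):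
--         if lo > hi:
--             return None
--         mid = (lo + hi) // 2
--         if numero == vector[mid][1]:
--             return mid
--         if numero < vector[mid][1]:
--             return go(lo, mid - 1)
--         return go(mid + 1, hi)
--     return go(0, len(vector) - 1)
-- ===== Notes on version B (the rewrite author's own statement) =====
-- stated objective: alternative
-- what changed: Replaces the while-loop with an 'encontrado' flag and mutable puntero/vectorLen bounds by a recursive divide-and-conquer helper carrying (lo, hi) that returns the index directly.
import Mathlib
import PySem

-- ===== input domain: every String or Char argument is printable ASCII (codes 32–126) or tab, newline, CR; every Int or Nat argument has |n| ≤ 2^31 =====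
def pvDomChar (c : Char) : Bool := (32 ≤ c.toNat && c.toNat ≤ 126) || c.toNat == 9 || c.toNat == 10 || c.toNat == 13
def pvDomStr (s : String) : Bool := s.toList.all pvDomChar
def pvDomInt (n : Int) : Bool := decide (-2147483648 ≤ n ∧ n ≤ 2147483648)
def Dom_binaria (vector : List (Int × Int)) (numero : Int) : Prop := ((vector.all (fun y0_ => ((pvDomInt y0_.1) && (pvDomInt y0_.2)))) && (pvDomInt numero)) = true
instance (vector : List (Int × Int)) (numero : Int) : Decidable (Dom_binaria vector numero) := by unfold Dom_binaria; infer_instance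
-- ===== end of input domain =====

-- B replaces A's while-loop with an 'encontrado' flag and mutable bounds by a recursive
-- divide-and-conquer helper on (lo, hi) returning the index directly (objective: alternative).

-- ===== PORT A =====
-- A's while loop: state (puntero, vectorLen, mitad, encontrado); returns the final (mitad, encontrado).
-- Python's 'mitad = int((puntero+vectorLen)/2)' truncates toward zero; on every reachable state
-- puntero + vectorLen ≥ 0 (puntero starts at 0 and never decreases), where truncation = floor,
-- so PySem.Int.floordiv is exact here.  vector[mitad] is always in range when the loop runs;
-- the 'none' arm of pyGet? (Python IndexError) is unreachable.
def binariaLoop (vector : List (Int × Int)) (numero : Int)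
    (puntero vectorLen mitad : Int) (encontrado : Bool) : Int × Bool :=
  if _h : ¬ encontrado ∧ puntero ≤ vectorLen then
    let m := PySem.Int.floordiv (puntero + vectorLen) 2
    match PySem.List.pyGet? vector m with
    | none => (m, false)  -- unreachable IndexError arm
    | some pr =>
      if numero == pr.2 then binariaLoop vector numero puntero vectorLen m true
      else if numero < pr.2 then binariaLoop vector numero puntero (m - 1) m false
      else binariaLoop vector numero (m + 1) vectorLen m false
  else (mitad, encontrado)
termination_by (if encontrado then 0 else (vectorLen - puntero + 1).toNat + 1)
decreasing_by
  all_goals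
    obtain ⟨h1, h2⟩ := _h
    simp only [Bool.not_eq_true] at h1
    subst h1
    simp only [Bool.false_eq_true, reduceIte]
    have := PySem.Int.floordiv_two_mid_bounds h2
    omega

def binaria (vector : List (Int × Int)) (numero : Int) : Option Int :=
  let r := binariaLoop vector numero 0 ((vector.length : Int) - 1) 0 false
  if r.2 then some r.1 else none

-- ===== PORT B =====
def binariaGo (vector : List (Int × Int)) (numero : Int) (lo hi : Int) : Option Int :=
  if lo > hi then none
  else
    let mid := PySem.Int.floordiv (lo + hi) 2
    match PySem.List.pyGet? vector mid with
    | none => none  -- unreachable IndexError arm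
    | some pr =>
      if numero == pr.2 then some mid
      else if numero < pr.2 then binariaGo vector numero lo (mid - 1)
      else binariaGo vector numero (mid + 1) hi
termination_by (hi - lo + 1).toNat
decreasing_by
  all_goals
    rename_i h
    have := PySem.Int.floordiv_two_mid_bounds (by omega : lo ≤ hi)
    omega

def binaria_alt (vector : List (Int × Int)) (numero : Int) : Option Int :=
  binariaGo vector numero 0 ((vector.length : Int) - 1)

-- ===== PRECONDITION & SPEC =====
def Spec_binaria (vector : List (Int × Int)) (numero : Int) (out : Option Int) : Prop := out = binaria_alt vector numero
instance (vector : List (Int × Int)) (numero : Int) (out : Option Int) : Decidable (Spec_binaria vector numero out) := by unfold Spec_binaria; infer_instance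

-- ===== CLAIM (what is proved, stated in full; the proofs are below) =====
def Claim_equal_binaria : Prop := ∀ (vector : List (Int × Int)) (numero : Int), Dom_binaria vector numero → Spec_binaria vector numero (binaria vector numero)

-- ===== LEMMAS AND PROOFS =====

theorem binariaLoop_true (vector : List (Int × Int)) (numero : Int) (p vl m : Int) :
    binariaLoop vector numero p vl m true = (m, true) := by
  rw [binariaLoop]; simp

theorem loop_eq_go (vector : List (Int × Int)) (numero : Int) :
    ∀ (k : Nat) (p vl m : Int), (vl - p + 1).toNat ≤ k →
      (if (binariaLoop vector numero p vl m false).2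
        then some (binariaLoop vector numero p vl m false).1 else none)
        = binariaGo vector numero p vl := by
  intro k
  induction k with
  | zero =>
    intro p vl m hk
    have hpv : vl < p := by omega
    rw [binariaLoop, binariaGo]
    simp [hpv, not_le.mpr hpv]
  | succ k ih =>
    intro p vl m hk
    rw [binariaLoop, binariaGo]
    by_cases hle : p ≤ vl
    · rw [dif_pos (show ¬ (false = true) ∧ p ≤ vl from ⟨by simp, hle⟩)]
      rw [if_neg (not_lt.mpr hle)]
      have hb := PySem.Int.floordiv_two_mid_bounds hle
      cases hget : PySem.List.pyGet? vector (PySem.Int.floordiv (p + vl) 2) with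
      | none => simp only [hget]; simp
      | some pr =>
        simp only [hget]
        by_cases heq : (numero == pr.2) = true
        · rw [beq_iff_eq] at heq
          simp [heq, binariaLoop_true]
        · have heq' : ¬ (numero = pr.2) := by simpa [beq_iff_eq] using heq
          simp only [beq_iff_eq]
          rw [if_neg heq', if_neg heq']
          by_cases hlt : numero < pr.2
          · rw [if_pos hlt, if_pos hlt]
            exact ih p (PySem.Int.floordiv (p + vl) 2 - 1) _ (by omega)
          · rw [if_neg hlt, if_neg hlt]
            exact ih (PySem.Int.floordiv (p + vl) 2 + 1) vl _ (by omega)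
    · rw [dif_neg (by simp [hle])]
      rw [if_pos (not_le.mp hle)]
      simp

-- ===== VERDICT (by name: the statement is the Claim_ definition above) =====
theorem binaria_spec : Claim_equal_binaria := by
  intro vector numero _
  unfold Spec_binaria binaria binaria_alt
  exact loop_eq_go vector numero _ 0 ((vector.length : Int) - 1) 0 le_rfl
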